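-- pv_equiv track=rewrite | github.com/kforiordan/advent-of-code | 2022/05-supply-stacks/05-supply-stacks.py | apply_move_9000
-- ===== SOURCE A (Python) =====
-- def apply_move_9000(stack, move):
--     if move["n"] == 0:
--         return stack
--     else:
--         c = stack[move["from"]].pop()	# pop the 'from' stack
--         stack[move["to"]].append(c)	# push it onto the 'to' stack
--         move["n"] -= 1
--         return apply_move_9000(stack, move)
-- ===== SOURCE B (Python) =====
-- def apply_move_9000(stack, move):
--     # Bulk version: move all n crates with one slice instead of n pops.
--     # Mutates stack and move in place like the original (move["n"] ends at 0).
--     n = move["n"]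
--     if n != 0:
--         f = move["from"]
--         t = move["to"]
--         src = stack[f]
--         dst = stack[t]
--         if f != t:
--             dst.extend(src[-n:][::-1])
--             del src[-n:]
--         move["n"] = 0
--     return stack
-- ===== Notes on version B (the rewrite author's own statement) =====
-- stated objective: faster
-- what changed: Replaces the n-deep recursion that pops and appends one crate at a time with a single bulk slice transfer (dst.extend(src[-n:][::-1]); del src[-n:]), with the from==to case recognised as a no-op.
import Mathlib
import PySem

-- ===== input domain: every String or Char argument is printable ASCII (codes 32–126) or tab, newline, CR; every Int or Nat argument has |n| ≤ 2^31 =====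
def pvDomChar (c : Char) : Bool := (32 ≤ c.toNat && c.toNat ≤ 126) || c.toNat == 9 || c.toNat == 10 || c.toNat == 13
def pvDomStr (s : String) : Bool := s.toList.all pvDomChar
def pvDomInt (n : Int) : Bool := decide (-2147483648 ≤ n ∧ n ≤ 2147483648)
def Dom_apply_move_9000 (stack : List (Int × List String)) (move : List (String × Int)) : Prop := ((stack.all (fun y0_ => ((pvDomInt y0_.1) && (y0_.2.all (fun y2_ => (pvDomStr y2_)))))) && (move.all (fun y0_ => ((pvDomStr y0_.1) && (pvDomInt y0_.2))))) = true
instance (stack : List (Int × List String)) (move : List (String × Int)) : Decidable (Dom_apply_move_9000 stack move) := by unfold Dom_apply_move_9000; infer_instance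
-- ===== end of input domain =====

-- B replaces A's one-crate-at-a-time recursion by a single bulk slice transfer (from==to is a no-op);
-- equivalence is about the RETURN value (both Pythons mutate stack/move in place the same way where A returns).


-- ===== PORT A =====
-- A's recursion: each call pops the top of stack[move["from"]], appends it to stack[move["to"]],
-- decrements move["n"] and recurses.  The decreasing move["n"] is carried as the Nat fuel (the
-- dicts' "from"/"to" entries never change; the branches that return early are exactly Python's
-- KeyError/IndexError points, excluded by Pre_).
def apply9000_go : Nat → PySem.Dict Int (List String) → PySem.Dict String Int → PySem.Dict Int (List String)
  | 0, st, _ => st                                             -- move["n"] == 0: return stack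
  | Nat.succ k, st, mv =>
    match mv.get? "from" with
    | none => st                                               -- KeyError
    | some f =>
      match st.get? f with
      | none => st                                             -- KeyError
      | some src =>
        match PySem.List.pop? src with
        | none => st                                           -- IndexError: pop from empty list
        | some (c, src') =>
          let st1 := st.insert f src'                          -- c = stack[move["from"]].pop()
          match mv.get? "to" with
          | none => st1                                        -- KeyError
          | some t =>
            match st1.get? t with
            | none => st1                                      -- KeyError
            | some dst => apply9000_go k (st1.insert t (dst ++ [c])) mv   -- stack[move["to"]].append(c); recurse

def apply_move_9000 (stack : List (Int × List String)) (move : List (String × Int)) : List (Int × List String) :=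
  let mv := PySem.Dict.mk move
  match mv.get? "n" with
  | none => stack                                              -- KeyError
  | some n => (apply9000_go n.toNat (PySem.Dict.mk stack) mv).items

-- ===== PORT B =====
def apply_move_9000_alt (stack : List (Int × List String)) (move : List (String × Int)) : List (Int × List String) :=
  let mv := PySem.Dict.mk move
  match mv.get? "n" with
  | none => stack                                              -- KeyError
  | some n =>
    if n == 0 then stack
    else
      match mv.get? "from", mv.get? "to" with
      | some f, some t =>
        let st := PySem.Dict.mk stack
        match st.get? f, st.get? t with
        | some src, some dst =>
          if f == t then stack                                 -- no-op transfer
          else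
            let moved := (PySem.List.slice src (some (-n)) none).reverse   -- src[-n:][::-1]
            let keep := PySem.List.slice src none (some (-n))              -- src after del src[-n:]
            ((st.insert t (dst ++ moved)).insert f keep).items
        | _, _ => stack                                        -- KeyError
      | _, _ => stack                                          -- KeyError

-- ===== PRECONDITION & SPEC =====
-- Pre_ excludes: inputs where A raises (missing "n"/"from"/"to" key, a from/to key absent from
-- stack, or too few crates on the from stack for the n pops), inputs with negative move["n"] on
-- which A recurses forever, and association lists with duplicate keys, which do not represent
-- Python dicts.
def Pre_apply_move_9000 (stack : List (Int × List String)) (move : List (String × Int)) : Prop :=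
  (decide (stack.map Prod.fst).Nodup && decide (move.map Prod.fst).Nodup &&
   Option.elim ((PySem.Dict.mk move).get? "n") false fun n =>
     decide (0 ≤ n) &&
     (n == 0 ||
      Option.elim ((PySem.Dict.mk move).get? "from") false fun f =>
        Option.elim ((PySem.Dict.mk move).get? "to") false fun t =>
          Option.elim ((PySem.Dict.mk stack).get? f) false fun src =>
            Option.elim ((PySem.Dict.mk stack).get? t) false fun _ =>
              if f == t then !src.isEmpty else decide (n ≤ (src.length : Int)))) = true
instance (stack : List (Int × List String)) (move : List (String × Int)) : Decidable (Pre_apply_move_9000 stack move) := by unfold Pre_apply_move_9000; infer_instance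

def pvWitness_apply_move_9000 : (List (Int × List String)) × (List (String × Int)) :=
  ([(0, ["A", "B", "C"]), (1, ["D"])], [("n", 2), ("from", 0), ("to", 1)])

def Spec_apply_move_9000 (stack : List (Int × List String)) (move : List (String × Int)) (out : List (Int × List String)) : Prop := out = apply_move_9000_alt stack move
instance (stack : List (Int × List String)) (move : List (String × Int)) (out : List (Int × List String)) : Decidable (Spec_apply_move_9000 stack move out) := by unfold Spec_apply_move_9000; infer_instance

-- ===== CLAIM (what is proved, stated in full; the proofs are below) =====
def Claim_equal_apply_move_9000 : Prop := ∀ (stack : List (Int × List String)) (move : List (String × Int)), Dom_apply_move_9000 stack move → Pre_apply_move_9000 stack move → Spec_apply_move_9000 stack move (apply_move_9000 stack move)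

-- ===== LEMMAS AND PROOFS =====

theorem dict_insert_get?_self {κ ν : Type} [BEq κ] [LawfulBEq κ] (d : PySem.Dict κ ν) (k : κ) (v : ν)
    (hnd : d.keys.Nodup) (h : d.get? k = some v) : d.insert k v = d := by
  have hc : d.contains k = true := by rw [PySem.Dict.contains_eq_isSome_get?, h]; rfl
  apply PySem.Dict.ext
  rw [PySem.Dict.items_insert_of_contains d v hc]
  conv_rhs => rw [← List.map_id d.items]
  apply List.map_congr_left
  intro p hp
  by_cases hpk : p.1 = k
  · have hmem : (k, p.2) ∈ d.items := by rw [← hpk]; exact hp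
    have := PySem.Dict.get?_of_mem_items d hmem hnd
    rw [h] at this
    have hv : p.2 = v := by injection this.symm
    obtain ⟨p1, p2⟩ := p
    simp only at hpk hv
    simp [hpk, hv]
  · simp [hpk]

theorem dict_insert_absorb {κ ν : Type} [BEq κ] [LawfulBEq κ] (d : PySem.Dict κ ν) (f t : κ) (a X Y : ν)
    (hc : d.contains f = true) (hft : f ≠ t) :
    ((d.insert f a).insert t X).insert f Y = (d.insert t X).insert f Y := by
  have hcf1 : (d.insert f a).contains t = (d.contains t) := by
    rw [PySem.Dict.contains_insert]; simp [beq_iff_eq, Ne.symm hft]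
  have hc3 : (d.insert t X).contains f = true := by
    rw [PySem.Dict.contains_insert]; simp [hc]
  apply PySem.Dict.ext
  by_cases hct : d.contains t = true
  · have hc2 : ((d.insert f a).insert t X).contains f = true := by
      rw [PySem.Dict.contains_insert, PySem.Dict.contains_insert]; simp [hc]
    rw [PySem.Dict.items_insert_of_contains _ Y hc2, PySem.Dict.items_insert_of_contains _ X (hcf1 ▸ hct),
        PySem.Dict.items_insert_of_contains _ a hc, PySem.Dict.items_insert_of_contains _ Y hc3,
        PySem.Dict.items_insert_of_contains _ X hct]
    simp only [List.map_map]
    apply List.map_congr_left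
    intro p _
    simp only [Function.comp]
    by_cases hpf : p.1 = f
    · simp [hpf, hft]
    · by_cases hpt : p.1 = t <;> simp [hpf, hpt, Ne.symm hft]
  · have hct' : d.contains t = false := by revert hct; cases d.contains t <;> simp
    have hc2 : ((d.insert f a).insert t X).contains f = true := by
      rw [PySem.Dict.contains_insert, PySem.Dict.contains_insert]; simp [hc]
    rw [PySem.Dict.items_insert_of_contains _ Y hc2,
        PySem.Dict.items_insert_of_not_contains _ X (hcf1 ▸ hct'),
        PySem.Dict.items_insert_of_contains _ a hc, PySem.Dict.items_insert_of_contains _ Y hc3,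
        PySem.Dict.items_insert_of_not_contains _ X hct']
    rw [List.map_append, List.map_append, List.map_map]
    congr 1
    · apply List.map_congr_left
      intro p _
      simp only [Function.comp]
      by_cases hpf : p.1 = f <;> simp [hpf]

theorem go_self (mv : PySem.Dict String Int) (f : Int)
    (hf : mv.get? "from" = some f) (ht : mv.get? "to" = some f) :
    ∀ (k : Nat) (st : PySem.Dict Int (List String)) (src : List String),
      st.keys.Nodup → st.get? f = some src → src ≠ [] → apply9000_go k st mv = st := by
  intro k
  induction k with
  | zero => intro st src _ _ _; rfl
  | succ k ih =>
    intro st src hnd hsrc hne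
    obtain ⟨ys, y, rfl⟩ : ∃ ys y, src = ys ++ [y] :=
      ⟨src.dropLast, src.getLast hne, (List.dropLast_append_getLast hne).symm⟩
    have hstep : apply9000_go (k + 1) st mv =
        apply9000_go k ((st.insert f ys).insert f (ys ++ [y])) mv := by
      simp [apply9000_go, hf, ht, hsrc, PySem.List.pop?_last, PySem.Dict.get?_insert_self]
    rw [hstep, PySem.Dict.insert_insert_self, dict_insert_get?_self st f (ys ++ [y]) hnd hsrc]
    exact ih st (ys ++ [y]) hnd hsrc hne

theorem go_transfer (mv : PySem.Dict String Int) (f t : Int)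
    (hf : mv.get? "from" = some f) (ht : mv.get? "to" = some t) (hft : f ≠ t) :
    ∀ (k : Nat) (st : PySem.Dict Int (List String)) (src dst : List String),
      st.keys.Nodup → st.get? f = some src → st.get? t = some dst → k ≤ src.length →
      apply9000_go k st mv =
        (st.insert t (dst ++ (src.drop (src.length - k)).reverse)).insert f (src.take (src.length - k)) := by
  intro k
  induction k with
  | zero =>
    intro st src dst hnd hsrc hdst _
    have hcf : st.contains f = true := by rw [PySem.Dict.contains_eq_isSome_get?, hsrc]; rfl
    simp only [Nat.sub_zero, List.drop_length, List.reverse_nil, List.append_nil, List.take_length]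
    rw [dict_insert_get?_self st t dst hnd hdst, dict_insert_get?_self st f src hnd hsrc,
        apply9000_go]
  | succ k ih =>
    intro st src dst hnd hsrc hdst hk
    have hne : src ≠ [] := by intro h; subst h; simp at hk
    obtain ⟨ys, y, rfl⟩ : ∃ ys y, src = ys ++ [y] :=
      ⟨src.dropLast, src.getLast hne, (List.dropLast_append_getLast hne).symm⟩
    have hky : k ≤ ys.length := by simpa using hk
    have hcf : st.contains f = true := by rw [PySem.Dict.contains_eq_isSome_get?, hsrc]; rfl
    have hct : st.contains t = true := by rw [PySem.Dict.contains_eq_isSome_get?, hdst]; rfl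
    have hstep : apply9000_go (k + 1) st mv =
        apply9000_go k ((st.insert f ys).insert t (dst ++ [y])) mv := by
      simp [apply9000_go, hf, ht, hsrc, PySem.List.pop?_last, PySem.Dict.get?_insert,
            Ne.symm hft, hdst]
    have hnd2 : ((st.insert f ys).insert t (dst ++ [y])).keys.Nodup := by
      rw [PySem.Dict.keys_insert_of_contains _ _ (by rw [PySem.Dict.contains_insert]; simp [hct]),
          PySem.Dict.keys_insert_of_contains _ _ hcf]
      exact hnd
    have hg1 : ((st.insert f ys).insert t (dst ++ [y])).get? f = some ys := by
      rw [PySem.Dict.get?_insert]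
      simp [hft, PySem.Dict.get?_insert_self]
    have hg2 : ((st.insert f ys).insert t (dst ++ [y])).get? t = some (dst ++ [y]) :=
      PySem.Dict.get?_insert_self _ _ _
    rw [hstep, ih _ ys (dst ++ [y]) hnd2 hg1 hg2 hky]
    have hm1 : (ys ++ [y]).length - (k + 1) = ys.length - k := by
      simp
    rw [hm1, List.take_append_of_le_length (by omega), List.drop_append_of_le_length (by omega)]
    rw [PySem.Dict.insert_insert_self,
        dict_insert_absorb st f t ys _ _ hcf hft]
    simp

-- A = B on Pre_ (the statement of Claim_equal_ with Spec_ unfolded)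
theorem apply_move_9000_eq_alt : ∀ (stack : List (Int × List String)) (move : List (String × Int)),
    Pre_apply_move_9000 stack move → apply_move_9000 stack move = apply_move_9000_alt stack move := by
  intro stack move hp
  unfold Pre_apply_move_9000 at hp
  simp only [Bool.and_eq_true, decide_eq_true_eq] at hp
  obtain ⟨⟨hnds, hndm⟩, hm⟩ := hp
  cases hn : (PySem.Dict.mk move).get? "n" with
  | none => rw [hn] at hm; simp at hm
  | some n =>
    rw [hn] at hm
    simp only [Option.elim_some, Bool.and_eq_true, Bool.or_eq_true, decide_eq_true_eq, beq_iff_eq] at hm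
    obtain ⟨h0n, hm⟩ := hm
    by_cases hn0 : n = 0
    · subst hn0
      simp [apply_move_9000, apply_move_9000_alt, hn, apply9000_go]
    · replace hm := hm.resolve_left hn0
      cases hfrom : (PySem.Dict.mk move).get? "from" with
      | none => rw [hfrom] at hm; simp at hm
      | some f =>
        rw [hfrom] at hm; simp only [Option.elim_some] at hm
        cases hto : (PySem.Dict.mk move).get? "to" with
        | none => rw [hto] at hm; simp at hm
        | some t =>
          rw [hto] at hm; simp only [Option.elim_some] at hm
          cases hsf : (PySem.Dict.mk stack).get? f with
          | none => rw [hsf] at hm; simp at hm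
          | some src =>
            rw [hsf] at hm; simp only [Option.elim_some] at hm
            cases hst : (PySem.Dict.mk stack).get? t with
            | none => rw [hst] at hm; simp at hm
            | some dst =>
              rw [hst] at hm; simp only [Option.elim_some] at hm
              have hndk : (PySem.Dict.mk stack).keys.Nodup := hnds
              by_cases hft : f = t
              · subst hft
                rw [if_pos (by simp)] at hm
                have hne : src ≠ [] := by
                  simpa [List.isEmpty_iff] using hm
                rw [hsf] at hst
                simp only [apply_move_9000, apply_move_9000_alt, hn]
                rw [go_self (PySem.Dict.mk move) f hfrom hto n.toNat (PySem.Dict.mk stack) src hndk hsf hne]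
                simp [hfrom, hto, hsf, hn0]
              · rw [if_neg (by simp [hft])] at hm
                replace hm : n ≤ (src.length : Int) := by simpa using hm
                have hpos : 0 < n := lt_of_le_of_ne h0n (Ne.symm hn0)
                have hkn : n.toNat ≤ src.length := by omega
                have hneg : -n = -((n.toNat : Nat) : Int) := by omega
                simp only [apply_move_9000, apply_move_9000_alt, hn]
                rw [go_transfer (PySem.Dict.mk move) f t hfrom hto hft n.toNat (PySem.Dict.mk stack) src dst hndk hsf hst hkn]
                simp only [hfrom, hto, hsf, hst, beq_iff_eq, hn0, hft, if_false]
                rw [hneg, PySem.List.slice_from_neg_natCast src n.toNat (by omega),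
                    PySem.List.slice_to_neg_natCast src n.toNat (by omega)]

-- ===== VERDICT (by name: the statement is the Claim_ definition above) =====
theorem apply_move_9000_spec : Claim_equal_apply_move_9000 := by
  intro stack move _ hp
  unfold Spec_apply_move_9000
  exact apply_move_9000_eq_alt stack move hp
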